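-- pv_equiv track=rewrite | github.com/mdiazv/codejam | 2022/1a/a/a.py | solve
-- ===== SOURCE A (Python) =====
-- def solve(S):
--     R = ''
--     streak = ''
--     for a, b in zip(S, S[1:]):
--         if a == b:
--             streak += a
--             #print (f'{a} == {b} => streak {streak}')
--         elif a > b:
--             R += streak+a
--             streak = ''
--             #print (f'{a} > {b} => streak {streak}')
--         else:
--             R += (streak+a)*2
--             #print (f'{a} < {b} => streak {streak}')
--             streak = ''
--         #print (R)
--
--     return R + streak + S[-1]
-- ===== SOURCE B (Python) =====
-- def solve(S):
--     parts = []
--     i, n = 0, len(S)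
--     while i < n:
--         j = i + 1
--         while j < n and S[j] == S[i]:
--             j += 1
--         seg = S[i:j]
--         if j < n and S[i] < S[j]:
--             parts.append(seg * 2)
--         else:
--             parts.append(seg)
--         i = j
--     return ''.join(parts)
-- ===== Notes on version B (the rewrite author's own statement) =====
-- stated objective: simpler
-- what changed: Replaces A's pairwise zip(S,S[1:]) fold with a streak accumulator by a two-pointer scan over maximal equal-character runs that emits each run (doubled when a strictly greater character follows, once otherwise) and joins the segments.
-- outside the precondition, e.g. on solve(''): A raises IndexError, B returns ''
import Mathlib
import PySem

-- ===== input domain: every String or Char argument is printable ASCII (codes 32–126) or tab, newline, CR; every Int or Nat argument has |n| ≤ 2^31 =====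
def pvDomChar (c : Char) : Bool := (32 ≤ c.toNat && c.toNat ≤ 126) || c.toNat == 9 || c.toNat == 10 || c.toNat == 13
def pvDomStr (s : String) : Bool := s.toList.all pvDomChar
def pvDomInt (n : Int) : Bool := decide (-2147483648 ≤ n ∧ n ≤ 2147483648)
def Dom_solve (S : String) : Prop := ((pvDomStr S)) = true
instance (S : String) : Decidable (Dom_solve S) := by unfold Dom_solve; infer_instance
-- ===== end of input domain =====

-- B replaces A's pairwise streak-accumulator fold by a two-pointer scan over maximal runs
-- (emit each run, doubled when a strictly larger run follows); objective: simpler decomposition.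

-- ===== PORT A =====
-- one fold step over a pair (a, b) of adjacent characters, state (R, streak)
def solveStep (rs : List Char × List Char) (p : Char × Char) : List Char × List Char :=
  if p.1 == p.2 then (rs.1, rs.2 ++ [p.1])
  else if p.1 > p.2 then (rs.1 ++ rs.2 ++ [p.1], [])
  else (rs.1 ++ (rs.2 ++ [p.1]) ++ (rs.2 ++ [p.1]), [])

def solve (S : String) : String :=
  let L := S.toList
  let st := (L.zip (L.drop 1)).foldl solveStep ([], [])
  match PySem.List.pyGet? L (-1) with
  | some c => String.ofList (st.1 ++ st.2 ++ [c])   -- R + streak + S[-1]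
  | none => ""                                   -- Python raises IndexError here (S = ""); excluded by Pre_

-- ===== PORT B =====
-- inner while loop: j runs to the end of the current run => takeWhile/dropWhile split
def solveRuns : List Char → List Char
  | [] => []
  | c :: t =>
    let run := c :: t.takeWhile (· == c)
    let rest := t.dropWhile (· == c)
    if rest = [] then run
    else if c < rest.headI then run ++ run ++ solveRuns rest
    else run ++ solveRuns rest
termination_by l => l.length
decreasing_by
  all_goals
    have := List.length_dropWhile_le (p := (· == c)) (l := t)
    simp; omega

def solve_alt (S : String) : String := String.ofList (solveRuns S.toList)

-- ===== PRECONDITION & SPEC =====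
-- Pre_ excludes exactly the empty string, on which Python A raises IndexError at S[-1].
def Pre_solve (S : String) : Prop := S ≠ ""
instance (S : String) : Decidable (Pre_solve S) := by unfold Pre_solve; infer_instance
def pvWitness_solve : String := "baab"

def Spec_solve (S : String) (out : String) : Prop := out = solve_alt S
instance (S : String) (out : String) : Decidable (Spec_solve S out) := by unfold Spec_solve; infer_instance

-- ===== CLAIM (what is proved, stated in full; the proofs are below) =====
def Claim_equal_solve : Prop := ∀ (S : String), Dom_solve S → Pre_solve S → Spec_solve S (solve S)

-- ===== LEMMAS AND PROOFS =====

-- recursive characterisation of A's fold (streak as first argument)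
def aRec : List Char → List Char → List Char
  | s, [] => s
  | s, [a] => s ++ [a]
  | s, a :: b :: t =>
    if a == b then aRec (s ++ [a]) (b :: t)
    else if a > b then s ++ [a] ++ aRec [] (b :: t)
    else (s ++ [a]) ++ (s ++ [a]) ++ aRec [] (b :: t)

lemma fold_eq (t : List Char) : ∀ (a : Char) (R s : List Char),
    (((a :: t).zip t).foldl solveStep (R, s)).1 ++ (((a :: t).zip t).foldl solveStep (R, s)).2
      ++ [(a :: t).getLast (by simp)] = R ++ aRec s (a :: t) := by
  induction t with
  | nil => intro a R s; simp [aRec]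
  | cons b t ih =>
    intro a R s
    simp only [List.zip_cons_cons, List.foldl_cons]
    have hl : (a :: b :: t).getLast (by simp) = (b :: t).getLast (by simp) := by
      simp [List.getLast]
    by_cases hab : a = b
    · rw [show solveStep (R, s) (a, b) = (R, s ++ [a]) from by
        simp only [solveStep]; rw [if_pos (by simpa using hab)]]
      rw [hl, ih b R (s ++ [a])]
      subst hab; simp [aRec]
    · by_cases hgt : a > b
      · rw [show solveStep (R, s) (a, b) = (R ++ s ++ [a], []) from by
          simp only [solveStep]; rw [if_neg (by simpa using hab), if_pos hgt]]
        rw [hl, ih b (R ++ s ++ [a]) []]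
        rw [show aRec s (a :: b :: t) = s ++ [a] ++ aRec [] (b :: t) from by
          simp only [aRec]; rw [if_neg (by simpa using hab), if_pos hgt]]
        simp
      · rw [show solveStep (R, s) (a, b) = (R ++ (s ++ [a]) ++ (s ++ [a]), []) from by
          simp only [solveStep]; rw [if_neg (by simpa using hab), if_neg hgt]]
        rw [hl, ih b (R ++ (s ++ [a]) ++ (s ++ [a])) []]
        rw [show aRec s (a :: b :: t) = (s ++ [a]) ++ (s ++ [a]) ++ aRec [] (b :: t) from by
          simp only [aRec]; rw [if_neg (by simpa using hab), if_neg hgt]]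
        simp

-- run characterisation of aRec
lemma aRec_run : ∀ (n : ℕ) (t : List Char), t.length ≤ n → ∀ (c : Char) (s : List Char),
    aRec s (c :: t) =
      (if (t.dropWhile (· == c)) = [] then s ++ (c :: t.takeWhile (· == c))
       else if c < (t.dropWhile (· == c)).headI then
         (s ++ (c :: t.takeWhile (· == c))) ++ (s ++ (c :: t.takeWhile (· == c)))
           ++ solveRuns (t.dropWhile (· == c))
       else (s ++ (c :: t.takeWhile (· == c))) ++ solveRuns (t.dropWhile (· == c))) := by
  intro n
  induction n with
  | zero =>
    intro t ht c s
    have : t = [] := by cases t <;> simp_all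
    subst this; simp [aRec]
  | succ n ih =>
    intro t ht c s
    cases t with
    | nil => simp [aRec]
    | cons b t' =>
      by_cases h : b = c
      · subst h
        rw [show aRec s (b :: b :: t') = aRec (s ++ [b]) (b :: t') from by simp [aRec],
          ih t' (by simpa using ht) b (s ++ [b])]
        by_cases hx : t'.dropWhile (· == b) = [] <;>
          simp [List.dropWhile_cons, List.takeWhile_cons, hx]
      · have hd : List.dropWhile (fun x => x == c) (b :: t') = b :: t' := by
          simp [List.dropWhile_cons, h]
        have htk : List.takeWhile (fun x => x == c) (b :: t') = [] := by
          simp [List.takeWhile_cons, h]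
        have hrec : aRec [] (b :: t') = solveRuns (b :: t') := by
          rw [ih t' (by simpa using ht) b []]
          rw [show solveRuns (b :: t') = _ from by rw [solveRuns]]
          simp
        have hne : (c == b) = false := by simp; exact fun e => h e.symm
        simp only [aRec, hne, Bool.false_eq_true, if_false, hd, htk, List.headI_cons,
          hrec, List.append_nil]
        by_cases hlt : c < b
        · rw [if_neg (by exact fun hgt => absurd hlt (not_lt_of_gt hgt)), if_pos hlt]
          simp
        · have hgt : c > b := lt_of_le_of_ne (le_of_not_gt hlt) (Ne.symm (by exact fun e => h e.symm))
          rw [if_pos hgt, if_neg hlt]; simp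

lemma aRec_eq_solveRuns (c : Char) (t : List Char) :
    aRec [] (c :: t) = solveRuns (c :: t) := by
  rw [aRec_run t.length t le_rfl c [], show solveRuns (c :: t) = _ from by rw [solveRuns]]
  simp

-- ===== VERDICT (by name: the statement is the Claim_ definition above) =====
theorem solve_spec : Claim_equal_solve := by
  intro S _ hS
  unfold Spec_solve solve solve_alt
  rcases hL : S.toList with _ | ⟨a, t⟩
  · exact absurd (by simpa using congrArg String.ofList hL) hS
  · simp only [hL, List.drop_one, List.tail_cons, PySem.List.pyGet?_neg_one]
    rw [List.getLast?_eq_some_getLast (by simp : (a :: t) ≠ [])]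
    rw [show (match some ((a :: t).getLast (by simp)) with
        | some c => String.ofList ((List.foldl solveStep ([], []) ((a :: t).zip t)).1 ++ (List.foldl solveStep ([], []) ((a :: t).zip t)).2 ++ [c])
        | none => "") = String.ofList ((List.foldl solveStep ([], []) ((a :: t).zip t)).1 ++ (List.foldl solveStep ([], []) ((a :: t).zip t)).2 ++ [(a :: t).getLast (by simp)]) from rfl]
    rw [fold_eq t a [] []]
    simp [aRec_eq_solveRuns]
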